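-- pv_equiv track=rewrite | github.com/kyunhui/algorithm | 백준/Silver/9342. 염색체/염색체.py | is_infected
-- ===== SOURCE A (Python) =====
-- valid = set("ABCDEF")
--
-- def is_infected(s: str) -> bool:
--     n = len(s)
--     for start in (0, 1):
--         i = start
--         if start == 1:
--             if n == 0 or s[0] not in valid:
--                 continue
--
--         if i >= n or s[i] != 'A':
--             continue
--         while i < n and s[i] == 'A':
--             i += 1
--
--         if i >= n or s[i] != 'F':
--             continue
--         while i < n and s[i] == 'F':
--             i += 1
--
--         if i >= n or s[i] != 'C':
--             continue
--         while i < n and s[i] == 'C':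
--             i += 1
--
--         if i == n:
--             return True
--         if i == n - 1 and s[i] in valid:
--             return True
--     return False
-- ===== SOURCE B (Python) =====
-- def is_infected(s: str) -> bool:
--     # single-pass DFA for the language [A-F]? A+ F+ C+ [A-F]?
--     state = "start"
--     for c in s:
--         if state == "start":
--             if c == 'A':
--                 state = "leadA"
--             elif c in "BCDEF":
--                 state = "lead"
--             else:
--                 return False
--         elif state == "leadA":
--             if c == 'A':
--                 state = "arun"
--             elif c == 'F':
--                 state = "frun"
--             else:
--                 return False
--         elif state == "lead":
--             if c == 'A':
--                 state = "arun"
--             else: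
--                 return False
--         elif state == "arun":
--             if c == 'A':
--                 state = "arun"
--             elif c == 'F':
--                 state = "frun"
--             else:
--                 return False
--         elif state == "frun":
--             if c == 'F':
--                 state = "frun"
--             elif c == 'C':
--                 state = "crun"
--             else:
--                 return False
--         elif state == "crun":
--             if c == 'C':
--                 state = "crun"
--             elif c in "ABDEF":
--                 state = "end"
--             else:
--                 return False
--         else:  # end
--             return False
--     return state in ("crun", "end")
-- ===== Notes on version B (the rewrite author's own statement) =====
-- stated objective: alternative
-- what changed: Replaces A's two-start restartable scanner (outer loop over start offsets 0/1 with index-based A+/F+/C+ consumption loops and end-of-string checks) by a single left-to-right pass of an explicit 8-state DFA for the language [A-F]?A+F+C+[A-F]?.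
import Mathlib
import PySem

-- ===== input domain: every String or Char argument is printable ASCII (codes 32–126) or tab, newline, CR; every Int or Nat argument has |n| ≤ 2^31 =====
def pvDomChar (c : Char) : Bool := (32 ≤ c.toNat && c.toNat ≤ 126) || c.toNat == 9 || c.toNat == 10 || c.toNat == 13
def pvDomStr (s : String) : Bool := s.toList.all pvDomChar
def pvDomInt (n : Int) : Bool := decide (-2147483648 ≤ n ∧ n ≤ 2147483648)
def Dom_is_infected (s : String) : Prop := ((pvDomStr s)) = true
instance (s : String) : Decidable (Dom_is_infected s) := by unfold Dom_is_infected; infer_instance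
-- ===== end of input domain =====

-- B replaces A's two-start index scanner by a single-pass DFA over an explicit state type (alternative decomposition, same cost).

-- ===== PORT A =====
def pvValid : List Char := ['A', 'B', 'C', 'D', 'E', 'F']

-- the `while i < n and s[i] == c: i += 1` loops, on the remaining suffix
def consumeRun (c : Char) : List Char → List Char
  | [] => []
  | x :: xs => if x = c then consumeRun c xs else x :: xs

-- the body of A's `for start in (0, 1)` loop after the lead char (if any) is consumed
def tryInfect (l : List Char) : Bool :=
  match l with
  | [] => false
  | x :: _ =>
    if x ≠ 'A' then false
    else
      let l1 := consumeRun 'A' l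
      match l1 with
      | [] => false
      | y :: _ =>
        if y ≠ 'F' then false
        else
          let l2 := consumeRun 'F' l1
          match l2 with
          | [] => false
          | z :: _ =>
            if z ≠ 'C' then false
            else
              match consumeRun 'C' l2 with
              | [] => true
              | [w] => decide (w ∈ pvValid)
              | _ => false

def is_infected (s : String) : Bool :=
  let l := s.toList
  if tryInfect l then true
  else
    match l with
    | [] => false
    | x :: xs => if x ∈ pvValid then tryInfect xs else false

-- ===== PORT B =====
inductive PvSt : Type
  | start | lead | leadA | arun | frun | crun | fin | dead
deriving DecidableEq, Repr

def pvStep : PvSt → Char → PvSt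
  | .start, c => if c = 'A' then .leadA else if c ∈ ['B','C','D','E','F'] then .lead else .dead
  | .leadA, c => if c = 'A' then .arun else if c = 'F' then .frun else .dead
  | .lead,  c => if c = 'A' then .arun else .dead
  | .arun,  c => if c = 'A' then .arun else if c = 'F' then .frun else .dead
  | .frun,  c => if c = 'F' then .frun else if c = 'C' then .crun else .dead
  | .crun,  c => if c = 'C' then .crun else if c ∈ ['A','B','D','E','F'] then .fin else .dead
  | .fin,  _ => .dead
  | .dead, _ => .dead

def pvRun (st : PvSt) : List Char → Bool
  | [] => st = PvSt.crun || st = PvSt.fin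
  | c :: cs =>
    let st' := pvStep st c
    if st' = PvSt.dead then false else pvRun st' cs

def is_infected_alt (s : String) : Bool := pvRun .start s.toList

-- ===== PRECONDITION & SPEC =====
def Spec_is_infected (s : String) (out : Bool) : Prop := out = is_infected_alt s
instance (s : String) (out : Bool) : Decidable (Spec_is_infected s out) := by unfold Spec_is_infected; infer_instance

-- ===== CLAIM (what is proved, stated in full; the proofs are below) =====
def Claim_equal_is_infected : Prop := ∀ (s : String), Dom_is_infected s → Spec_is_infected s (is_infected s)

-- ===== LEMMAS AND PROOFS =====

-- A's C-phase and F-phase as standalone functions (tails of tryInfect)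
def phC (l : List Char) : Bool :=
  match l with
  | [] => false
  | z :: _ =>
    if z ≠ 'C' then false
    else
      match consumeRun 'C' l with
      | [] => true
      | [w] => decide (w ∈ pvValid)
      | _ => false

def phF (l : List Char) : Bool :=
  match l with
  | [] => false
  | y :: _ => if y ≠ 'F' then false else phC (consumeRun 'F' l)

theorem tryInfect_eq (l : List Char) :
    tryInfect l = match l with
      | [] => false
      | x :: _ => if x ≠ 'A' then false else phF (consumeRun 'A' l) := by
  cases l with
  | nil => rfl
  | cons x xs =>
    simp only [tryInfect, phF, phC]

theorem pvRun_cons (st : PvSt) (c : Char) (cs : List Char) :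
    pvRun st (c :: cs) =
      if pvStep st c = PvSt.dead then false else pvRun (pvStep st c) cs := rfl

theorem pvRun_fin (cs : List Char) : pvRun .fin cs = cs.isEmpty := by
  cases cs <;> simp [pvRun, pvStep]

theorem pvRun_crun (cs : List Char) :
    pvRun .crun cs = (match consumeRun 'C' cs with
      | [] => true
      | [w] => decide (w ∈ pvValid)
      | _ => false) := by
  induction cs with
  | nil => rfl
  | cons c t ih =>
    rw [pvRun_cons]
    by_cases hc : c = 'C'
    · subst hc
      have h : pvStep PvSt.crun 'C' = PvSt.crun := by decide
      rw [h, if_neg (by decide), ih]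
      simp [consumeRun]
    · by_cases hv : c ∈ (['A','B','D','E','F'] : List Char)
      · have h : pvStep PvSt.crun c = PvSt.fin := by
          simp [pvStep, hc, hv]
        rw [h, if_neg (by decide), pvRun_fin]
        have hcv : c ∈ pvValid := by fin_cases hv <;> simp [pvValid]
        cases t <;> simp [consumeRun, hc, hcv]
      · have h : pvStep PvSt.crun c = PvSt.dead := by
          simp [pvStep, hc, hv]
        rw [h, if_pos rfl]
        have hnv : c ∉ pvValid := by
          intro hmem; fin_cases hmem <;> simp_all
        cases t <;> simp [consumeRun, hc, hnv]

theorem pvRun_frun (cs : List Char) : pvRun .frun cs = phC (consumeRun 'F' cs) := by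
  induction cs with
  | nil => rfl
  | cons c t ih =>
    rw [pvRun_cons]
    by_cases hf : c = 'F'
    · subst hf
      have h : pvStep PvSt.frun 'F' = PvSt.frun := by decide
      rw [h, if_neg (by decide), ih]
      simp [consumeRun]
    · by_cases hc : c = 'C'
      · subst hc
        have h : pvStep PvSt.frun 'C' = PvSt.crun := by decide
        rw [h, if_neg (by decide), pvRun_crun]
        simp [consumeRun, hf, phC]
      · have h : pvStep PvSt.frun c = PvSt.dead := by simp [pvStep, hf, hc]
        rw [h, if_pos rfl]
        simp [consumeRun, hf, hc, phC]

theorem pvRun_arun (cs : List Char) : pvRun .arun cs = phF (consumeRun 'A' cs) := by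
  induction cs with
  | nil => rfl
  | cons c t ih =>
    rw [pvRun_cons]
    by_cases ha : c = 'A'
    · subst ha
      have h : pvStep PvSt.arun 'A' = PvSt.arun := by decide
      rw [h, if_neg (by decide), ih]
      simp [consumeRun]
    · by_cases hf : c = 'F'
      · subst hf
        have h : pvStep PvSt.arun 'F' = PvSt.frun := by decide
        rw [h, if_neg (by decide), pvRun_frun]
        simp [consumeRun, ha, phF]
      · have h : pvStep PvSt.arun c = PvSt.dead := by simp [pvStep, ha, hf]
        rw [h, if_pos rfl]
        simp [consumeRun, ha, hf, phF]

theorem pvRun_lead (l : List Char) : pvRun .lead l = tryInfect l := by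
  rw [tryInfect_eq]
  cases l with
  | nil => rfl
  | cons c t =>
    rw [pvRun_cons]
    by_cases ha : c = 'A'
    · subst ha
      have h : pvStep PvSt.lead 'A' = PvSt.arun := by decide
      rw [h, if_neg (by decide), pvRun_arun]
      simp [consumeRun]
    · have h : pvStep PvSt.lead c = PvSt.dead := by simp [pvStep, ha]
      rw [h, if_pos rfl]
      simp [ha]

theorem pvRun_leadA (cs : List Char) :
    pvRun .leadA cs = (pvRun .arun cs || pvRun .lead cs) := by
  cases cs with
  | cons c t =>
    rw [pvRun_cons, pvRun_cons, pvRun_cons]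
    by_cases ha : c = 'A'
    · subst ha
      have h1 : pvStep PvSt.leadA 'A' = PvSt.arun := by decide
      have h2 : pvStep PvSt.arun 'A' = PvSt.arun := by decide
      have h3 : pvStep PvSt.lead 'A' = PvSt.arun := by decide
      rw [h1, h2, h3]; simp
    · by_cases hf : c = 'F'
      · subst hf
        have h1 : pvStep PvSt.leadA 'F' = PvSt.frun := by decide
        have h2 : pvStep PvSt.arun 'F' = PvSt.frun := by decide
        have h3 : pvStep PvSt.lead 'F' = PvSt.dead := by decide
        rw [h1, h2, h3]; simp
      · have h1 : pvStep PvSt.leadA c = PvSt.dead := by simp [pvStep, ha, hf]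
        have h2 : pvStep PvSt.arun c = PvSt.dead := by simp [pvStep, ha, hf]
        have h3 : pvStep PvSt.lead c = PvSt.dead := by simp [pvStep, ha]
        rw [h1, h2, h3]; simp
  | nil => rfl

theorem if_then_true (a b : Bool) : (if a = true then true else b) = (a || b) := by
  cases a <;> simp

theorem main_eq (l : List Char) :
    (if tryInfect l then true
     else match l with
       | [] => false
       | x :: xs => if x ∈ pvValid then tryInfect xs else false) = pvRun .start l := by
  cases l with
  | nil => simp [tryInfect, pvRun]
  | cons x xs =>
    rw [if_then_true, pvRun_cons]
    by_cases ha : x = 'A'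
    · subst ha
      have h : pvStep PvSt.start 'A' = PvSt.leadA := by decide
      rw [h, if_neg (by decide), pvRun_leadA, pvRun_lead, pvRun_arun]
      rw [tryInfect_eq ('A' :: xs)]
      have hc : consumeRun 'A' ('A' :: xs) = consumeRun 'A' xs := by simp [consumeRun]
      have hv : ('A' : Char) ∈ pvValid := by simp [pvValid]
      simp [hc, hv]
    · by_cases hv : x ∈ (['B','C','D','E','F'] : List Char)
      · have h : pvStep PvSt.start x = PvSt.lead := by simp [pvStep, ha, hv]
        rw [h, if_neg (by decide), pvRun_lead]
        have hxv : x ∈ pvValid := by fin_cases hv <;> simp [pvValid]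
        rw [tryInfect_eq (x :: xs)]
        simp [ha, hxv]
      · have h : pvStep PvSt.start x = PvSt.dead := by simp [pvStep, ha, hv]
        rw [h, if_pos rfl]
        have hxv : x ∉ pvValid := by
          intro hmem; fin_cases hmem <;> simp_all
        rw [tryInfect_eq (x :: xs)]
        simp [ha, hxv]

-- ===== VERDICT (by name: the statement is the Claim_ definition above) =====
theorem is_infected_spec : Claim_equal_is_infected := by
  intro s _
  unfold Spec_is_infected is_infected is_infected_alt
  exact main_eq s.toList
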